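-- pv_equiv track=rewrite | github.com/UltimateWilliamWu/Personal_Blog | content/UNSW/COMP9021/Lab/pythonProject/Prac/prac6.py | triangle_characters
-- ===== SOURCE A (Python) =====
-- def triangle_characters(n):
--     rows = n
--     cols = 2 * n - 1
--     matrix = [[' ' for _ in range(cols)] for _ in range(rows)]
--
--     current_char_code = ord('A')
--
--     for i in range(n):
--         # 计算每一行中字符的起始位置
--         start = n - 1 - i
--
--         # 构造该行字符：正向 + 反向（去掉中间重复）
--         forward = []
--         for _ in range(i + 1):
--             forward.append(chr(current_char_code))
--             current_char_code += 1
--             if current_char_code > ord('Z'):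
--                 current_char_code = ord('A')
--         backward = forward[:-1][::-1]
--         full_chars = forward + backward
--
--         # 填入矩阵
--         for j, c in enumerate(full_chars):
--             matrix[i][start + j] = c
--
--     return matrix
-- ===== SOURCE B (Python) =====
-- def triangle_characters(n):
--     result = []
--     for i in range(n):
--         base = i * (i + 1) // 2
--         chars = [chr(ord('A') + (base + min(j, 2 * i - j)) % 26) for j in range(2 * i + 1)]
--         pad = [' '] * (n - 1 - i)
--         result.append(pad + chars + pad)
--     return result
-- ===== Notes on version B (the rewrite author's own statement) =====
-- stated objective: simpler
-- what changed: Replaces the threaded character counter and the forward+reversed-list construction with a closed-form per-row formula: base = i*(i+1)//2 and cell j = chr(ord('A') + (base + min(j, 2*i-j)) % 26), building each row directly as pad+chars+pad instead of mutating a pre-filled matrix.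
import Mathlib
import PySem

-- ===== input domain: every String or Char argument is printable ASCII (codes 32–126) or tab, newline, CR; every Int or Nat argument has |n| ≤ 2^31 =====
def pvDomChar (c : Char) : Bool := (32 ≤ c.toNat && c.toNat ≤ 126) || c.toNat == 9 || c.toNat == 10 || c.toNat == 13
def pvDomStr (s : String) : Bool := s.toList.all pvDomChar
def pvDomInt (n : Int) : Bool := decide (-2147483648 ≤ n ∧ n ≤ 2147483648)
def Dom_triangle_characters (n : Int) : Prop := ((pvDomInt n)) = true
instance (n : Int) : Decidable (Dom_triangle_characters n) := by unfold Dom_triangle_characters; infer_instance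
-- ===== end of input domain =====

-- B replaces A's threaded character counter and forward+reversed list with a closed-form
-- per-row formula (base = i*(i+1)//2, mirrored index min(j, 2i-j), mod 26), building each
-- row directly as pad ++ chars ++ pad instead of mutating a pre-filled matrix: simpler.


-- ===== PORT A =====
-- chr(code) for an int code (A only feeds it codes 65..90)
def tcChr (c : Int) : String := String.mk [Char.ofNat c.toNat]

-- A's inner loop 'for _ in range(m): forward.append(chr(code)); code += 1; wrap past Z'
def tcForward : Nat → List String × Int → List String × Int
  | 0, st => st
  | m + 1, (fw, code) =>
      let fw := fw ++ [tcChr code]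
      let code := code + 1
      let code := if code > 90 then (65 : Int) else code
      tcForward m (fw, code)

-- A's write loop 'for j, c in enumerate(full_chars): matrix[i][start + j] = c'
-- (k is the running index start + j)
def tcWrite : List String → Nat → List String → List String
  | r, _, [] => r
  | r, k, c :: cs => tcWrite (r.set k c) (k + 1) cs

-- body of A's outer 'for i in range(n)' loop; state = (matrix, current_char_code)
def tcStep (n : Int) (st : List (List String) × Int) (i : Nat) : List (List String) × Int :=
  let start := n - 1 - (i : Int)
  let p := tcForward (i + 1) ([], st.2)
  let full := p.1 ++ p.1.dropLast.reverse
  let row := st.1.getD i []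
  (st.1.set i (tcWrite row start.toNat full), p.2)

def triangle_characters (n : Int) : List (List String) :=
  let cols := 2 * n - 1
  let matrix := (List.range n.toNat).map (fun _ => (List.range cols.toNat).map (fun _ => " "))
  ((List.range n.toNat).foldl (tcStep n) (matrix, (65 : Int))).1

-- ===== PORT B =====
def triangle_characters_alt (n : Int) : List (List String) :=
  (List.range n.toNat).map (fun i =>
    let base := i * (i + 1) / 2
    let chars := (List.range (2 * i + 1)).map
      (fun j => String.mk [Char.ofNat (65 + (base + min j (2 * i - j)) % 26)])
    let pad := List.replicate (n.toNat - 1 - i) " "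
    pad ++ chars ++ pad)

-- ===== PRECONDITION & SPEC =====
def Spec_triangle_characters (n : Int) (out : List (List String)) : Prop := out = triangle_characters_alt n
instance (n : Int) (out : List (List String)) : Decidable (Spec_triangle_characters n out) := by unfold Spec_triangle_characters; infer_instance

-- ===== CLAIM (what is proved, stated in full; the proofs are below) =====
def Claim_equal_triangle_characters : Prop := ∀ (n : Int), Dom_triangle_characters n → Spec_triangle_characters n (triangle_characters n)

-- ===== LEMMAS AND PROOFS =====

-- B's row i (for n.toNat = N), named for the proofs
def rowB (N i : Nat) : List String :=
  List.replicate (N - 1 - i) " " ++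
    (List.range (2 * i + 1)).map
      (fun j => String.mk [Char.ofNat (65 + (i * (i + 1) / 2 + min j (2 * i - j)) % 26)]) ++
    List.replicate (N - 1 - i) " "

theorem alt_eq_rowB (n : Int) : triangle_characters_alt n = (List.range n.toNat).map (rowB n.toNat) := rfl

theorem map_const_range {α : Type} (k : Nat) (x : α) :
    (List.range k).map (fun _ => x) = List.replicate k x := by
  simp [List.map_const']

-- characterisation of A's inner loop
theorem tcForward_spec (m : Nat) : ∀ (t : Nat) (fw : List String),
    tcForward m (fw, 65 + ((t % 26 : Nat) : Int)) =
      (fw ++ (List.range m).map (fun j => String.mk [Char.ofNat (65 + (t + j) % 26)]),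
       65 + (((t + m) % 26 : Nat) : Int)) := by
  induction m with
  | zero => intro t fw; simp [tcForward]
  | succ m ih =>
      intro t fw
      have h1 : tcChr (65 + ((t % 26 : Nat) : Int)) = String.mk [Char.ofNat (65 + (t + 0) % 26)] := by
        have harg : (65 + ((t % 26 : Nat) : Int)).toNat = 65 + (t + 0) % 26 := by omega
        simp only [tcChr]
        rw [harg]
      have h2 : (if (65 + ((t % 26 : Nat) : Int) + 1) > 90 then (65 : Int)
                  else 65 + ((t % 26 : Nat) : Int) + 1) = 65 + (((t + 1) % 26 : Nat) : Int) := by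
        split_ifs <;> omega
      show tcForward m (fw ++ [tcChr (65 + ((t % 26 : Nat) : Int))], _) = _
      rw [h1, h2, ih (t + 1) (fw ++ [String.mk [Char.ofNat (65 + (t + 0) % 26)]])]
      have h3 : t + 1 + m = t + (m + 1) := by omega
      have h4 : (List.range (m + 1)).map (fun j => String.mk [Char.ofNat (65 + (t + j) % 26)]) =
          String.mk [Char.ofNat (65 + (t + 0) % 26)] ::
            (List.range m).map (fun j => String.mk [Char.ofNat (65 + (t + 1 + j) % 26)]) := by
        rw [List.range_succ_eq_map]
        simp only [List.map_cons, List.map_map]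
        congr 1
        apply List.map_congr_left
        intro j _
        simp only [Function.comp]
        have hj : t + (j + 1) = t + 1 + j := by omega
        rw [hj]
      rw [h3, h4]
      simp

-- characterisation of A's write loop on a row that is padding ++ spaces
theorem tcWrite_spec (lst : List String) : ∀ (p : List String) (C s : Nat),
    s = p.length → lst.length ≤ C →
    tcWrite (p ++ List.replicate C " ") s lst =
      p ++ lst ++ List.replicate (C - lst.length) " " := by
  induction lst with
  | nil => intro p C s hs _; subst hs; simp [tcWrite]
  | cons c cs ih =>
      intro p C s hs hle
      subst hs
      have hC : C = (C - 1) + 1 := by simp at hle; omega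
      have hset : (p ++ List.replicate C " ").set p.length c =
          (p ++ [c]) ++ List.replicate (C - 1) " " := by
        rw [hC, List.replicate_succ, List.set_append_right _ _ (le_refl _)]
        simp
      show tcWrite ((p ++ List.replicate C " ").set p.length c) (p.length + 1) cs = _
      rw [hset]
      have hlen : p.length + 1 = (p ++ [c]).length := by simp
      rw [hlen, ih (p ++ [c]) (C - 1) _ rfl (by simp at hle ⊢; omega)]
      simp at hle ⊢
      omega

-- forward ++ reversed(dropLast forward) is the mirrored closed form
theorem full_eq_mid (m t : Nat) :
    ((List.range (m + 1)).map (fun j => String.mk [Char.ofNat (65 + (t + j) % 26)]) ++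
      ((List.range (m + 1)).map (fun j => String.mk [Char.ofNat (65 + (t + j) % 26)])).dropLast.reverse) =
      (List.range (2 * m + 1)).map
        (fun j => String.mk [Char.ofNat (65 + (t + min j (2 * m - j)) % 26)]) := by
  apply List.ext_getElem
  · simp; omega
  · intro k h1 h2
    simp only [List.length_append, List.length_reverse, List.length_dropLast,
      List.length_map] at h1
    rw [List.getElem_map, List.getElem_range]
    by_cases hk : k < m + 1
    · rw [List.getElem_append_left (by simpa using hk)]
      rw [List.getElem_map, List.getElem_range]
      congr 3
      simp only [List.length_range] at *
      omega
    · rw [List.getElem_append_right (by simpa using hk)]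
      rw [List.getElem_reverse, List.getElem_dropLast, List.getElem_map, List.getElem_range]
      congr 3
      simp only [List.length_map, List.length_range, List.length_dropLast] at *
      omega

-- triangular numbers step
theorem tri_succ (m : Nat) : m * (m + 1) / 2 + (m + 1) = (m + 1) * (m + 2) / 2 := by
  have h : (m + 1) * (m + 2) = m * (m + 1) + 2 * (m + 1) := by ring
  rw [h, Nat.add_mul_div_left _ _ (by norm_num : 0 < 2)]

-- the outer-loop invariant
theorem outer_inv (N : Nat) (hN : 1 ≤ N) : ∀ (m : Nat), m ≤ N →
    (List.range m).foldl (tcStep (N : Int))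
        (List.replicate N (List.replicate (2 * N - 1) " "), (65 : Int)) =
      ((List.range m).map (rowB N) ++ List.replicate (N - m) (List.replicate (2 * N - 1) " "),
       65 + (((m * (m + 1) / 2) % 26 : Nat) : Int)) := by
  intro m
  induction m with
  | zero => intro _; simp
  | succ m ih =>
      intro hm
      have hmN : m < N := by omega
      rw [List.range_succ, List.foldl_append, ih (by omega)]
      simp only [List.foldl_cons, List.foldl_nil]
      -- unfold one step
      show tcStep (N : Int)
          ((List.range m).map (rowB N) ++ List.replicate (N - m) (List.replicate (2 * N - 1) " "),
           65 + (((m * (m + 1) / 2) % 26 : Nat) : Int)) m = _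
      unfold tcStep
      simp only
      -- the forward pass
      rw [show (65 : Int) + (((m * (m + 1) / 2) % 26 : Nat) : Int) =
            65 + (((m * (m + 1) / 2) % 26 : Nat) : Int) from rfl]
      rw [tcForward_spec (m + 1) (m * (m + 1) / 2) []]
      simp only [List.nil_append]
      -- start.toNat
      have hstart : ((N : Int) - 1 - (m : Int)).toNat = N - 1 - m := by omega
      rw [hstart]
      -- the current row is all spaces
      have hrep : List.replicate (N - m) (List.replicate (2 * N - 1) " ") =
          List.replicate (2 * N - 1) " " :: List.replicate (N - m - 1) (List.replicate (2 * N - 1) " ") := by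
        have h : N - m = (N - m - 1) + 1 := by omega
        conv_lhs => rw [h]
        rw [List.replicate_succ]
      have hgetD : (((List.range m).map (rowB N)) ++
            List.replicate (N - m) (List.replicate (2 * N - 1) " ")).getD m [] =
          List.replicate (2 * N - 1) " " := by
        rw [hrep]
        rw [List.getD_eq_getElem?_getD, List.getElem?_append_right (by simp)]
        simp
      rw [hgetD]
      -- the write produces rowB N m
      have hsplit : List.replicate (2 * N - 1) " " =
          List.replicate (N - 1 - m) " " ++ List.replicate (N + m) (" " : String) := by
        rw [← List.replicate_add]; congr 1; omega
      have hwrite : tcWrite (List.replicate (2 * N - 1) " ") (N - 1 - m)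
            ((List.range (m + 1)).map (fun j => String.mk [Char.ofNat (65 + (m * (m + 1) / 2 + j) % 26)]) ++
              ((List.range (m + 1)).map (fun j => String.mk [Char.ofNat (65 + (m * (m + 1) / 2 + j) % 26)])).dropLast.reverse) =
          rowB N m := by
        rw [show ((List.range (m + 1)).map (fun j => String.mk [Char.ofNat (65 + (m * (m + 1) / 2 + j) % 26)]) ++
              ((List.range (m + 1)).map (fun j => String.mk [Char.ofNat (65 + (m * (m + 1) / 2 + j) % 26)])).dropLast.reverse) =
            (List.range (2 * m + 1)).map
              (fun j => String.mk [Char.ofNat (65 + (m * (m + 1) / 2 + min j (2 * m - j)) % 26)])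
          from full_eq_mid m (m * (m + 1) / 2)]
        rw [hsplit]
        rw [tcWrite_spec _ (List.replicate (N - 1 - m) " ") (N + m) (N - 1 - m) (by simp)
          (by simp; omega)]
        unfold rowB
        have hcnt : N + m - ((List.range (2 * m + 1)).map
              (fun j => String.mk [Char.ofNat (65 + (m * (m + 1) / 2 + min j (2 * m - j)) % 26)])).length =
            N - 1 - m := by
          simp; omega
        rw [hcnt]
      rw [hwrite]
      -- the set appends the new row
      have hset : (((List.range m).map (rowB N)) ++
            List.replicate (N - m) (List.replicate (2 * N - 1) " ")).set m (rowB N m) =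
          (List.range (m + 1)).map (rowB N) ++
            List.replicate (N - (m + 1)) (List.replicate (2 * N - 1) " ") := by
        rw [hrep, List.set_append_right _ _ (by simp), List.range_succ, List.map_append]
        simp only [List.length_map, List.length_range, Nat.sub_self, List.set_cons_zero,
          List.map_cons, List.map_nil]
        rw [List.append_assoc]
        have hc : N - m - 1 = N - (m + 1) := by omega
        rw [hc]
        rfl
      rw [hset]
      have hcode : m * (m + 1) / 2 + (m + 1) = (m + 1) * ((m + 1) + 1) / 2 := tri_succ m
      rw [hcode, List.range_succ]

-- ===== VERDICT (by name: the statement is the Claim_ definition above) =====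
theorem triangle_characters_spec : Claim_equal_triangle_characters := by
  intro n _
  unfold Spec_triangle_characters
  by_cases hn : n ≤ 0
  · have h0 : n.toNat = 0 := by omega
    simp [triangle_characters, triangle_characters_alt, h0]
  · obtain ⟨N, rfl⟩ : ∃ N : Nat, n = (N : Int) := ⟨n.toNat, by omega⟩
    have hN : 1 ≤ N := by omega
    unfold triangle_characters
    simp only [Int.toNat_natCast]
    rw [map_const_range, map_const_range]
    have hcols : (2 * (N : Int) - 1).toNat = 2 * N - 1 := by omega
    rw [hcols, outer_inv N hN N (le_refl _)]
    rw [alt_eq_rowB]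
    simp
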